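-- pv_equiv track=rewrite | github.com/the-omega-institute/automath | theory/2026_golden_ratio_driven_scan_projection_generation_recursive_emergence/scripts/exp_replica_softcore_cycle_subgraph_cyccomp_audit.py | _sizes_from_missing_edges
-- ===== SOURCE A (Python) =====
-- from typing import Dict, List, Tuple
--
-- def _sizes_from_missing_edges(m: int, present_mask: int) -> List[int]:
--     # Edges are indexed by t=0..m-1, edge t connects t and (t+1 mod m).
--     # present_mask has bit t=1 iff edge t is present.
--     missing = [t for t in range(m) if ((present_mask >> t) & 1) == 0]
--     if not missing:
--         raise ValueError("Expected a proper subset: at least one missing edge.")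
--     missing.sort()
--     sizes: List[int] = []
--     for i in range(len(missing) - 1):
--         sizes.append(missing[i + 1] - missing[i])
--     sizes.append(missing[0] + m - missing[-1])
--     if sum(sizes) != m:
--         raise RuntimeError(f"Invalid component sizes: m={m}, sizes={sizes}, sum={sum(sizes)}")
--     return sizes
-- ===== SOURCE B (Python) =====
-- from typing import List
--
--
-- def _sizes_from_missing_edges(m: int, present_mask: int) -> List[int]:
--     # Run-length view: complement the m-bit mask, render it as a binary string
--     # (LSB first) and split on '1'; each zero-run between missing edges gives a
--     # component of size run_length + 1, and the leading/trailing runs fold into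
--     # the wrap-around component.  No scan over t and no index differencing.
--     full = (1 << m) - 1
--     masked = full ^ (present_mask & full)  # bit t set iff edge t is missing
--     if masked == 0:
--         raise ValueError("Expected a proper subset: at least one missing edge.")
--     runs = bin(masked)[:1:-1].split('1')
--     sizes = [len(run) + 1 for run in runs[1:]]
--     sizes[-1] += len(runs[0]) + (m - masked.bit_length())
--     return sizes
-- ===== Notes on version B (the rewrite author's own statement) =====
-- stated objective: faster
-- what changed: B never scans t=0..m-1 or differences missing indices: it complements the m-bit mask, renders it as an LSB-first binary string and splits on '1', reading each component size as zero-run length + 1 (run-length algorithm; A builds the missing-index list by a Python-level range scan, sorts it, and runs a separate index-differencing loop plus a dead sum check).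
import Mathlib
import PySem

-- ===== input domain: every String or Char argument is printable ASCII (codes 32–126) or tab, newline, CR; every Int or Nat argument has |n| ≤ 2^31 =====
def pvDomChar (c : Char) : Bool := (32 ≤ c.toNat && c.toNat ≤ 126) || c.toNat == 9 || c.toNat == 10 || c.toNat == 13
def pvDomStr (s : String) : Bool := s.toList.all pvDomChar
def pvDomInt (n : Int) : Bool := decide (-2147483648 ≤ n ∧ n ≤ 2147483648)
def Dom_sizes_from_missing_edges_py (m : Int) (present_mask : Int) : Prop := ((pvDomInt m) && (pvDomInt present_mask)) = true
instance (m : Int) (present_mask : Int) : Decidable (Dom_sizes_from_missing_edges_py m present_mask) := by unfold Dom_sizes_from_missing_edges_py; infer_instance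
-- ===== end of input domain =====

-- B complements the m-bit mask, renders it as an LSB-first binary string and splits
-- it on '1': component sizes are zero-run lengths + 1 (run-length algorithm), instead
-- of A's scan of t = 0..m-1, list of missing indices, sort and index-differencing loop.

-- ===== PORT A =====
-- t ranges over 0..m-1, so t ≥ 0 and 't.toNat' is exactly Python's shift amount '>> t'.
def sizes_from_missing_edges_py (m : Int) (present_mask : Int) : List Int :=
  let missing := (PySem.List.pyRange 0 m 1).filter
      (fun t => PySem.Int.band (present_mask >>> t.toNat) 1 == 0)
  if missing.isEmpty then [] -- Python: raise ValueError (outside Pre_)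
  else
    let missing' := PySem.List.sorted missing (fun x => x) false
    let sizes := (PySem.List.pyRange 0 ((missing'.length : Int) - 1) 1).foldl
        (fun acc i => acc ++ [PySem.List.pyGetD missing' (i + 1) 0
                              - PySem.List.pyGetD missing' i 0]) []
    let sizes := sizes ++ [PySem.List.pyGetD missing' 0 0 + m
                           - PySem.List.pyGetD missing' (-1) 0]
    if sizes.sum ≠ m then [] -- Python: raise RuntimeError
    else sizes

-- ===== PORT B =====
-- bin(n)[:1:-1] is n's base-2 digit string LSB-first (exact for n > 0, the only use);
-- ported by hand as the n%2 / n//2 digit recursion.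
def pvBinRev (n : Nat) : List Char :=
  if _h : n = 0 then []
  else (if n % 2 = 1 then '1' else '0') :: pvBinRev (n / 2)
decreasing_by exact Nat.div_lt_self (Nat.pos_of_ne_zero _h) (by norm_num)

-- '(1 << m) - 1' uses m.toNat: under Pre_ we have m ≥ 1 (Python raises for m < 0);
-- masked ≥ 0 always, so masked.toNat is exact.
def sizes_from_missing_edges_py_alt (m : Int) (present_mask : Int) : List Int :=
  let full : Int := ((1:Int) <<< m.toNat) - 1
  let masked : Int := PySem.Int.bxor full (PySem.Int.band present_mask full)
  if masked == 0 then [] -- Python: raise ValueError (outside Pre_)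
  else
    let runs := PySem.Chars.splitOn (pvBinRev masked.toNat) ['1']
    let sizes : List Int :=
      (PySem.List.slice runs (some 1) none).map (fun run => (run.length : Int) + 1)
    PySem.List.pySetD sizes (-1)
      (PySem.List.pyGetD sizes (-1) 0
        + (((PySem.List.pyGetD runs 0 []).length : Int)
           + (m - (PySem.Int.bitLength masked : Int))))

-- ===== PRECONDITION & SPEC =====
-- Pre_ excludes exactly the inputs with no missing edge among t = 0..m-1 (including
-- m ≤ 0), on which Python A raises ValueError (B raises the same ValueError there);
-- stated in closed form: the lowest zero bit of present_mask, whose index is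
-- bit_length(present_mask XOR (present_mask+1)) - 1, must lie below m.
def Pre_sizes_from_missing_edges_py (m : Int) (present_mask : Int) : Prop :=
  0 < m ∧ present_mask ≠ -1 ∧
    (PySem.Int.bitLength (PySem.Int.bxor present_mask (present_mask + 1)) : Int) - 1 < m
instance (m : Int) (present_mask : Int) : Decidable (Pre_sizes_from_missing_edges_py m present_mask) := by
  unfold Pre_sizes_from_missing_edges_py; infer_instance
def pvWitness_sizes_from_missing_edges_py : Int × Int := (5, 11)

def Spec_sizes_from_missing_edges_py (m : Int) (present_mask : Int) (out : List Int) : Prop := out = sizes_from_missing_edges_py_alt m present_mask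
instance (m : Int) (present_mask : Int) (out : List Int) : Decidable (Spec_sizes_from_missing_edges_py m present_mask out) := by unfold Spec_sizes_from_missing_edges_py; infer_instance

-- ===== CLAIM (what is proved, stated in full; the proofs are below) =====
def Claim_equal_sizes_from_missing_edges_py : Prop := ∀ (m : Int) (present_mask : Int), Dom_sizes_from_missing_edges_py m present_mask → Pre_sizes_from_missing_edges_py m present_mask → Spec_sizes_from_missing_edges_py m present_mask (sizes_from_missing_edges_py m present_mask)

-- ===== LEMMAS AND PROOFS =====

-- gaps between consecutive elements, seeded with the previous element p
def pvAdj (p : Int) : List Int → List Int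
  | [] => []
  | y :: r => (y - p) :: pvAdj y r

-- last element of p :: r
def pvLastD (p : Int) : List Int → Int
  | [] => p
  | y :: r => pvLastD y r

lemma pvAdj_length (p : Int) (r : List Int) : (pvAdj p r).length = r.length := by
  induction r generalizing p with
  | nil => rfl
  | cons y r ih => simp [pvAdj, ih]

lemma pvAdj_getElem (p : Int) (r : List Int) (k : Nat) (h : k < r.length) :
    (pvAdj p r)[k]'(by rw [pvAdj_length]; exact h)
      = r[k] - (p :: r)[k]'(by simp only [List.length_cons]; omega) := by
  induction r generalizing p k with
  | nil => simp at h
  | cons y r ih =>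
    cases k with
    | zero => simp [pvAdj]
    | succ k => simpa [pvAdj] using ih y k (by simpa using h)

lemma pvAdj_sum (p : Int) (r : List Int) : (pvAdj p r).sum = pvLastD p r - p := by
  induction r generalizing p with
  | nil => simp [pvAdj, pvLastD]
  | cons y r ih => simp [pvAdj, pvLastD, ih]

lemma pvLastD_getElem (p : Int) (r : List Int) :
    pvLastD p r = (p :: r)[r.length]'(by simp) := by
  induction r generalizing p with
  | nil => rfl
  | cons y r ih => simpa [pvLastD] using ih y

lemma pvMapDiff (x : Int) (r : List Int) :
    (PySem.List.pyRange 0 (((x :: r).length : Int) - 1) 1).map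
      (fun i => PySem.List.pyGetD (x :: r) (i + 1) 0 - PySem.List.pyGetD (x :: r) i 0)
    = pvAdj x r := by
  apply List.ext_getElem
  · simp [PySem.List.length_pyRange_one, pvAdj_length]
  · intro k h1 h2
    have hk : k < r.length := by
      simpa [PySem.List.length_pyRange_one] using h1
    simp only [List.getElem_map, PySem.List.getElem_pyRange_one]
    rw [pvAdj_getElem x r k hk]
    have e1 : (0 : Int) + (k : Int) + 1 = ((k + 1 : Nat) : Int) := by push_cast; ring
    have e2 : (0 : Int) + (k : Int) = ((k : Nat) : Int) := by omega
    rw [e1, e2, PySem.List.pyGetD_natCast, PySem.List.pyGetD_natCast]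
    rw [List.getD_eq_getElem _ _ (by simp; omega), List.getD_eq_getElem _ _ (by simp; omega)]
    simp

-- parity decompositions of the bitwise operations
lemma pvBit0 (x c : Nat) (hc : c < 2) : (2*x+c).testBit 0 = decide (c = 1) := by
  simp [Nat.testBit_zero]
  omega

lemma pvBitSucc (x c i : Nat) (hc : c < 2) : (2*x+c).testBit (i+1) = x.testBit i := by
  rw [Nat.testBit_add_one]
  congr 1
  omega

lemma pvAndParity (x y a b : Nat) (ha : a < 2) (hb : b < 2) :
    (2*x+a) &&& (2*y+b) = 2*(x &&& y) + (a &&& b) := by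
  have hab : a &&& b < 2 := lt_of_le_of_lt Nat.and_le_left ha
  apply Nat.eq_of_testBit_eq
  intro i
  cases i with
  | zero =>
    rw [Nat.testBit_and, pvBit0 x a ha, pvBit0 y b hb, pvBit0 (x &&& y) (a &&& b) hab]
    interval_cases a <;> interval_cases b <;> decide
  | succ i =>
    rw [Nat.testBit_and, pvBitSucc x a i ha, pvBitSucc y b i hb,
      pvBitSucc (x &&& y) (a &&& b) i hab, Nat.testBit_and]

lemma pvXorParity (x y a b : Nat) (ha : a < 2) (hb : b < 2) :
    (2*x+a) ^^^ (2*y+b) = 2*(x ^^^ y) + (a ^^^ b) := by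
  have hab : a ^^^ b < 2 := by interval_cases a <;> interval_cases b <;> decide
  apply Nat.eq_of_testBit_eq
  intro i
  cases i with
  | zero =>
    rw [Nat.testBit_xor, pvBit0 x a ha, pvBit0 y b hb, pvBit0 (x ^^^ y) (a ^^^ b) hab]
    interval_cases a <;> interval_cases b <;> decide
  | succ i =>
    rw [Nat.testBit_xor, pvBitSucc x a i ha, pvBitSucc y b i hb,
      pvBitSucc (x ^^^ y) (a ^^^ b) i hab, Nat.testBit_xor]

lemma pvSubAndXorBit (a b : Nat) (ha : a < 2) (hb : b < 2) :
    a - (a &&& b) = a ^^^ (a &&& b) := by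
  interval_cases a <;> interval_cases b <;> decide

-- subtracting a submask is XOR: X - (X & Y) = X ^ (X & Y)
lemma pvSubAndXor (X : Nat) : ∀ Y : Nat, X - (X &&& Y) = X ^^^ (X &&& Y) := by
  induction X using Nat.strong_induction_on with
  | _ X ih =>
    intro Y
    rcases Nat.eq_zero_or_pos X with hX | hX
    · subst hX; simp
    · obtain ⟨x, a, y, b, hX', hY', ha, hb⟩ : ∃ x a y b, X = 2*x+a ∧ Y = 2*y+b ∧ a < 2 ∧ b < 2 :=
        ⟨X/2, X%2, Y/2, Y%2, by omega, by omega, by omega, by omega⟩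
      subst hX'; subst hY'
      have hab : a &&& b < 2 := lt_of_le_of_lt Nat.and_le_left ha
      rw [pvAndParity x y a b ha hb, pvXorParity x (x &&& y) a (a &&& b) ha hab]
      have ihx := ih x (by omega) y
      have hbitx := pvSubAndXorBit a b ha hb
      have h1 : x &&& y ≤ x := Nat.and_le_left
      have h2 : a &&& b ≤ a := Nat.and_le_left
      omega

-- positions of the set bits of n, in increasing order
def pvPos (n : Nat) : List Nat :=
  if h : n = 0 then []
  else if n % 2 = 1 then 0 :: (pvPos (n / 2)).map (· + 1)
  else (pvPos (n / 2)).map (· + 1)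
decreasing_by all_goals exact Nat.div_lt_self (Nat.pos_of_ne_zero h) (by norm_num)

lemma pvPos_mem (n : Nat) : ∀ t : Nat, t ∈ pvPos n ↔ n.testBit t = true := by
  induction n using Nat.strong_induction_on with
  | _ n ih =>
    intro t
    by_cases hn : n = 0
    · subst hn; simp [pvPos]
    · rw [pvPos, dif_neg hn]
      have hrec := ih (n / 2) (Nat.div_lt_self (Nat.pos_of_ne_zero hn) (by norm_num))
      cases t with
      | zero =>
        by_cases hodd : n % 2 = 1
        · simp [hodd, Nat.testBit_zero]
        · simp only [if_neg hodd, List.mem_map]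
          simp [Nat.testBit_zero, hodd]
      | succ t =>
        have hbit : n.testBit (t+1) = (n/2).testBit t := Nat.testBit_add_one n t
        by_cases hodd : n % 2 = 1
        · simp only [if_pos hodd, List.mem_cons, List.mem_map, hbit, ← hrec t]
          constructor
          · rintro (h | ⟨u, hu, he⟩)
            · omega
            · have : u = t := by omega
              subst this; exact hu
          · intro h; exact Or.inr ⟨t, h, rfl⟩
        · simp only [if_neg hodd, List.mem_map, hbit, ← hrec t]
          constructor
          · rintro ⟨u, hu, he⟩
            have : u = t := by omega
            subst this; exact hu
          · intro h; exact ⟨t, h, rfl⟩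

lemma pvPos_pairwise (n : Nat) : (pvPos n).Pairwise (· < ·) := by
  induction n using Nat.strong_induction_on with
  | _ n ih =>
    by_cases hn : n = 0
    · subst hn; simp [pvPos]
    · rw [pvPos, dif_neg hn]
      have hrec := ih (n / 2) (Nat.div_lt_self (Nat.pos_of_ne_zero hn) (by norm_num))
      have hmap : ((pvPos (n / 2)).map (· + 1)).Pairwise (· < ·) := by
        rw [List.pairwise_map]
        exact hrec.imp (fun h => by omega)
      by_cases hodd : n % 2 = 1
      · rw [if_pos hodd]
        refine List.Pairwise.cons ?_ hmap
        intro x hx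
        obtain ⟨u, _, rfl⟩ := List.mem_map.mp hx
        omega
      · rw [if_neg hodd]; exact hmap

lemma pvBitLengthEq (k z : Nat) (h1 : 2^z ≤ k) (h2 : k < 2^(z+1)) :
    PySem.Int.bitLength (k : Int) = z + 1 := by
  have hpz : (0:Nat) < 2^z := by positivity
  have hk0 : k ≠ 0 := by omega
  have hne : ((k:Int)) ≠ 0 := by exact_mod_cast hk0
  have hb1 := PySem.Int.lt_two_pow_bitLength (k : Int)
  have hb2 := PySem.Int.two_pow_bitLength_le (k : Int) hne
  rw [Int.natAbs_natCast] at hb1 hb2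
  have hzL : z < PySem.Int.bitLength (k : Int) :=
    (Nat.pow_lt_pow_iff_right (by norm_num)).mp (lt_of_le_of_lt h1 hb1)
  have hLz : PySem.Int.bitLength (k : Int) - 1 < z + 1 :=
    (Nat.pow_lt_pow_iff_right (by norm_num)).mp (lt_of_le_of_lt hb2 h2)
  omega

lemma pvXorSuccNat (p : Nat) : ∃ z, p ^^^ (p+1) = 2^(z+1) - 1 ∧ p.testBit z = false := by
  induction p using Nat.strong_induction_on with
  | _ p ih =>
    by_cases hodd : p % 2 = 1
    · obtain ⟨q, rfl⟩ : ∃ q, p = 2*q+1 := ⟨p/2, by omega⟩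
      obtain ⟨z, hx, hb⟩ := ih q (by omega)
      refine ⟨z+1, ?_, ?_⟩
      · have e1 : 2*q+1+1 = 2*(q+1) + 0 := by ring
        rw [e1, pvXorParity q (q+1) 1 0 (by omega) (by omega), hx,
          show (1:Nat) ^^^ 0 = 1 from rfl]
        have e2 : (2:Nat)^(z+1+1) = 2*2^(z+1) := by ring
        have hp1 : (0:Nat) < 2^(z+1) := by positivity
        omega
      · rw [pvBitSucc q 1 z (by omega)]
        exact hb
    · obtain ⟨q, rfl⟩ : ∃ q, p = 2*q := ⟨p/2, by omega⟩
      refine ⟨0, ?_, ?_⟩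
      · have e0 : 2*q = 2*q + 0 := rfl
        have e1 : 2*q + 1 = 2*q + 1 := rfl
        rw [show (2*q) ^^^ (2*q+1) = 2*(q ^^^ q) + (0 ^^^ 1) from
          pvXorParity q q 0 1 (by omega) (by omega)]
        simp
      · have hbs : (2*q).testBit 0 = decide ((0:Nat) = 1) := pvBit0 q 0 (by omega)
        simp [hbs]

lemma pvXorPredNat (p : Nat) (hp : p ≠ 0) :
    ∃ z, p ^^^ (p-1) = 2^(z+1) - 1 ∧ p.testBit z = true := by
  induction p using Nat.strong_induction_on with
  | _ p ih =>
    by_cases hodd : p % 2 = 1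
    · obtain ⟨q, rfl⟩ : ∃ q, p = 2*q+1 := ⟨p/2, by omega⟩
      refine ⟨0, ?_, ?_⟩
      · have e1 : 2*q+1-1 = 2*q + 0 := by omega
        rw [e1, pvXorParity q q 1 0 (by omega) (by omega)]
        simp
      · have hbs : (2*q+1).testBit 0 = decide ((1:Nat) = 1) := pvBit0 q 1 (by omega)
        simp [hbs]
    · obtain ⟨q, rfl⟩ : ∃ q, p = 2*q := ⟨p/2, by omega⟩
      have hq : q ≠ 0 := by omega
      obtain ⟨z, hx, hb⟩ := ih q (by omega) hq
      refine ⟨z+1, ?_, ?_⟩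
      · have e1 : 2*q-1 = 2*(q-1) + 1 := by omega
        have e0 : 2*q = 2*q + 0 := rfl
        rw [e1, show (2*q) ^^^ (2*(q-1)+1) = 2*(q ^^^ (q-1)) + (0 ^^^ 1) from
          pvXorParity q (q-1) 0 1 (by omega) (by omega), hx,
          show (0:Nat) ^^^ 1 = 1 from rfl]
        have e2 : (2:Nat)^(z+1+1) = 2*2^(z+1) := by ring
        have hp1 : (0:Nat) < 2^(z+1) := by positivity
        omega
      · have hbs : (2*q).testBit (z+1) = q.testBit z := pvBitSucc q 0 z (by omega)
        rw [hbs]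
        exact hb

-- A's bit test on a nonnegative mask
lemma pvBitCond_nonneg (p t : Nat) :
    PySem.Int.band ((p : Int) >>> t) 1 = 0 ↔ p.testBit t = false := by
  have ht : p.testBit t = decide ((p >>> t) % 2 = 1) := Eq.symm Nat.decide_shiftRight_mod_two_eq_one
  have e : ((p : Int) >>> t) = ((p >>> t : Nat) : Int) := rfl
  have e2 : (1 : Int) = ((1 : Nat) : Int) := rfl
  rw [ht, e, e2, PySem.Int.band_natCast, Nat.and_one_is_mod]
  generalize p >>> t = u
  constructor
  · intro hz
    have h0 : u % 2 = 0 := by exact_mod_cast hz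
    simp [h0]
  · intro hz
    have h1 : ¬ (u % 2 = 1) := by simpa using hz
    have h0 : u % 2 = 0 := by omega
    simp [h0]

-- A's bit test on a negative mask -p-1 (~p)
lemma pvBitCond_neg (p t : Nat) :
    PySem.Int.band ((-(p : Int) - 1) >>> t) 1 = 0 ↔ p.testBit t = true := by
  have ht : p.testBit t = decide ((p >>> t) % 2 = 1) := Eq.symm Nat.decide_shiftRight_mod_two_eq_one
  have e0 : (-(p : Int) - 1) = Int.negSucc p := by
    rw [Int.negSucc_eq]; ring
  have e1 : (Int.negSucc p) >>> t = Int.negSucc (p >>> t) := rfl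
  rw [ht, e0, e1]
  generalize p >>> t = u
  have h1 : ¬ (0:Int) ≤ Int.negSucc u := by
    rw [Int.negSucc_eq]; omega
  have h2 : (0:Int) ≤ 1 := by norm_num
  simp only [PySem.Int.band, if_neg h1, if_pos h2]
  have e2 : ((1:Int)).toNat = 1 := rfl
  have e3 : (-(Int.negSucc u) - 1).toNat = u := by
    rw [Int.negSucc_eq]; omega
  rw [e2, e3, Nat.and_comm, Nat.and_one_is_mod]
  constructor
  · intro hz
    have h0 : 1 - u % 2 = 0 := by exact_mod_cast hz
    have h1' : u % 2 = 1 := by omega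
    simp [h1']
  · intro hz
    have h1' : u % 2 = 1 := of_decide_eq_true hz
    rw [h1']
    norm_num

-- the closed-form Pre_ names the lowest zero bit of present_mask; extract it
lemma pvPreElim (m pm : Int) (hpre : Pre_sizes_from_missing_edges_py m pm) :
    ∃ zN : Nat, (zN : Int) < m ∧ PySem.Int.band (pm >>> zN) 1 = 0 := by
  obtain ⟨hm, hne1, hz⟩ := hpre
  cases pm with
  | ofNat p =>
    obtain ⟨z, hx, hb⟩ := pvXorSuccNat p
    have e2 : PySem.Int.bxor (Int.ofNat p) ((Int.ofNat p) + 1) = ((p ^^^ (p+1) : Nat) : Int) := by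
      rw [show (Int.ofNat p) = ((p : Nat) : Int) from rfl,
        show ((p : Nat) : Int) + 1 = ((p+1 : Nat) : Int) from by push_cast; ring,
        PySem.Int.bxor_natCast]
    have hp1 : (0:Nat) < 2^(z+1) := by positivity
    have e4 : (2:Nat)^(z+1) = 2*2^z := by ring
    have hpz : (0:Nat) < 2^z := by positivity
    have e3 : PySem.Int.bitLength (PySem.Int.bxor (Int.ofNat p) ((Int.ofNat p) + 1)) = z + 1 := by
      rw [e2, hx]
      exact pvBitLengthEq (2^(z+1)-1) z (by omega) (by omega)
    rw [e3] at hz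
    refine ⟨z, by push_cast at hz ⊢; omega, ?_⟩
    rw [show (Int.ofNat p) = ((p : Nat) : Int) from rfl]
    exact (pvBitCond_nonneg p z).mpr hb
  | negSucc p =>
    have hneg : Int.negSucc p = -(p:Int) - 1 := by rw [Int.negSucc_eq]; ring
    have hp0 : p ≠ 0 := by
      intro h0
      apply hne1
      rw [hneg, h0]
      norm_num
    obtain ⟨z, hx, hb⟩ := pvXorPredNat p hp0
    have hppos : (0:Int) < (p:Int) := by exact_mod_cast Nat.pos_of_ne_zero hp0
    have h1 : ¬ (0:Int) ≤ Int.negSucc p := by rw [hneg]; omega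
    have h2 : ¬ (0:Int) ≤ Int.negSucc p + 1 := by rw [hneg]; omega
    have e2 : PySem.Int.bxor (Int.negSucc p) ((Int.negSucc p) + 1) = ((p ^^^ (p-1) : Nat) : Int) := by
      simp only [PySem.Int.bxor, if_neg h1, if_neg h2]
      have t1 : (-(Int.negSucc p) - 1).toNat = p := by rw [hneg]; omega
      have t2 : (-((Int.negSucc p) + 1) - 1).toNat = p - 1 := by rw [hneg]; omega
      rw [t1, t2]
    have hp1 : (0:Nat) < 2^(z+1) := by positivity
    have e4 : (2:Nat)^(z+1) = 2*2^z := by ring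
    have hpz : (0:Nat) < 2^z := by positivity
    have e3 : PySem.Int.bitLength (PySem.Int.bxor (Int.negSucc p) ((Int.negSucc p) + 1)) = z + 1 := by
      rw [e2, hx]
      exact pvBitLengthEq (2^(z+1)-1) z (by omega) (by omega)
    rw [e3] at hz
    refine ⟨z, by push_cast at hz ⊢; omega, ?_⟩
    rw [show (Int.negSucc p) = -((p : Nat) : Int) - 1 from hneg]
    exact (pvBitCond_neg p z).mpr hb

lemma pvFull (mN : Nat) : ((1:Int) <<< mN) - 1 = ((2^mN - 1 : Nat) : Int) := by
  have h1 : (1:Int) <<< mN = ((1 <<< mN : Nat) : Int) := rfl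
  rw [h1, Nat.one_shiftLeft]
  have hle : (1:Nat) ≤ 2^mN := Nat.one_le_two_pow
  rw [Nat.cast_sub hle, Nat.cast_one]

-- the complemented m-bit mask of B: its value as a Nat, and its bits
lemma pvMaskedSpec (m pm : Int) (hm : 0 ≤ m) :
    ∃ M : Nat,
      PySem.Int.bxor (((1:Int) <<< m.toNat) - 1) (PySem.Int.band pm (((1:Int) <<< m.toNat) - 1)) = (M : Int) ∧
      ∀ tN : Nat, (M.testBit tN = true ↔ ((tN : Int) < m ∧ PySem.Int.band (pm >>> tN) 1 = 0)) := by
  set mN := m.toNat with hmN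
  have hmcast : (mN : Int) = m := Int.toNat_of_nonneg hm
  have hfullbit : ∀ tN : Nat, (2^mN - 1).testBit tN = decide (tN < mN) :=
    fun tN => Nat.testBit_two_pow_sub_one mN tN
  rw [pvFull mN]
  cases pm with
  | ofNat p =>
    have hp : (Int.ofNat p) = (p : Int) := rfl
    rw [hp, PySem.Int.band_natCast, PySem.Int.bxor_natCast]
    refine ⟨(2^mN - 1) ^^^ (p &&& (2^mN - 1)), rfl, ?_⟩
    intro tN
    rw [Nat.testBit_xor, Nat.testBit_and, hfullbit tN, pvBitCond_nonneg p tN, ← hmcast]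
    by_cases ht : tN < mN <;> by_cases hb : p.testBit tN = true <;>
      simp [ht, hb, Nat.cast_lt]
  | negSucc p =>
    have hp : (Int.negSucc p) = -(p : Int) - 1 := by rw [Int.negSucc_eq]; ring
    have h1 : ¬ (0:Int) ≤ Int.negSucc p := by rw [hp]; omega
    have h2 : (0:Int) ≤ ((2^mN - 1 : Nat) : Int) := by positivity
    have hband : PySem.Int.band (Int.negSucc p) ((2^mN - 1 : Nat) : Int)
        = (((2^mN - 1) - ((2^mN - 1) &&& p) : Nat) : Int) := by
      simp only [PySem.Int.band, if_neg h1, if_pos h2]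
      have e1 : (((2^mN - 1 : Nat) : Int)).toNat = 2^mN - 1 := Int.toNat_natCast _
      have e2 : (-(Int.negSucc p) - 1).toNat = p := by rw [hp]; omega
      rw [e1, e2]
    rw [hband, pvSubAndXor (2^mN - 1) p, PySem.Int.bxor_natCast]
    rw [Nat.xor_xor_cancel_left]
    refine ⟨(2^mN - 1) &&& p, rfl, ?_⟩
    intro tN
    rw [Nat.testBit_and, hfullbit tN, hp, pvBitCond_neg p tN, ← hmcast]
    by_cases ht : tN < mN <;> by_cases hb : p.testBit tN = true <;>
      simp [ht, hb, Nat.cast_lt]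

-- B's bit positions are exactly A's filtered range
lemma pvPosEq (m pm : Int) (_hm : 0 ≤ m) (M : Nat)
    (hbit : ∀ tN : Nat, (M.testBit tN = true ↔ ((tN : Int) < m ∧ PySem.Int.band (pm >>> tN) 1 = 0))) :
    (pvPos M).map (fun t : Nat => (t : Int)) =
      (PySem.List.pyRange 0 m 1).filter (fun t => PySem.Int.band (pm >>> t.toNat) 1 == 0) := by
  have hmem : ∀ a : Int, a ∈ (pvPos M).map (fun t : Nat => (t : Int)) ↔
      a ∈ (PySem.List.pyRange 0 m 1).filter (fun t => PySem.Int.band (pm >>> t.toNat) 1 == 0) := by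
    intro a
    rw [List.mem_map, List.mem_filter]
    constructor
    · rintro ⟨tN, htN, rfl⟩
      rw [pvPos_mem M tN, hbit tN] at htN
      refine ⟨?_, ?_⟩
      · rw [PySem.List.mem_pyRange_one]
        exact ⟨by positivity, htN.1⟩
      · have : ((tN : Int)).toNat = tN := Int.toNat_natCast tN
        rw [this]
        simp only [beq_iff_eq, Int.shiftRight_natCast_right]
        exact htN.2
    · rintro ⟨hr, hc⟩
      rw [PySem.List.mem_pyRange_one] at hr
      refine ⟨a.toNat, ?_, Int.toNat_of_nonneg hr.1⟩
      rw [pvPos_mem M a.toNat, hbit a.toNat]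
      refine ⟨by omega, ?_⟩
      simp only [beq_iff_eq, Int.shiftRight_natCast_right] at hc
      exact hc
  have hpl : ((pvPos M).map (fun t : Nat => (t : Int))).Pairwise (· < ·) := by
    rw [List.pairwise_map]
    exact (pvPos_pairwise M).imp (fun h => by exact_mod_cast h)
  have hnd1 : ((pvPos M).map (fun t : Nat => (t : Int))).Nodup :=
    hpl.imp (fun h => ne_of_lt h)
  have hpw2 : ((PySem.List.pyRange 0 m 1).filter
      (fun t => PySem.Int.band (pm >>> t.toNat) 1 == 0)).Pairwise (· < ·) :=
    (PySem.List.pairwise_lt_pyRange_one (a := 0) (b := m)).filter _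
  have hnd2 : ((PySem.List.pyRange 0 m 1).filter
      (fun t => PySem.Int.band (pm >>> t.toNat) 1 == 0)).Nodup :=
    hpw2.imp (fun h => ne_of_lt h)
  have hperm := (List.perm_ext_iff_of_nodup hnd1 hnd2).mpr hmem
  exact PySem.List.eq_of_perm_of_pairwise_le_of_injective (fun x : Int => x)
      (fun a b h => h) hperm (hpl.imp (fun h => le_of_lt h))
      (hpw2.imp (fun h => le_of_lt h))

-- shift invariance of gaps and last element
lemma pvAdj_shift (p : Int) (xs : List Int) :
    pvAdj (p+1) (xs.map (fun z => z + 1)) = pvAdj p xs := by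
  induction xs generalizing p with
  | nil => rfl
  | cons y ys ih =>
    simp only [List.map_cons, pvAdj, ih]
    congr 1
    ring

lemma pvLastD_shift (p : Int) (xs : List Int) :
    pvLastD (p+1) (xs.map (fun z => z + 1)) = pvLastD p xs + 1 := by
  induction xs generalizing p with
  | nil => rfl
  | cons y ys ih => simpa [pvLastD] using ih y

lemma pvCastMap (t : List Nat) :
    (t.map (fun z => z + 1)).map (fun z : Nat => (z : Int))
      = (t.map (fun z : Nat => (z : Int))).map (fun z => z + 1) := by
  simp only [List.map_map]
  apply List.map_congr_left
  intro z _
  simp only [Function.comp_apply]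
  push_cast
  ring

-- str.split('1') as a structural recursion: (first piece, remaining pieces)
def pvSplit1 : List Char → List Char × List (List Char)
  | [] => ([], [])
  | c :: cs =>
    let r := pvSplit1 cs
    if c = '1' then ([], r.1 :: r.2) else (c :: r.1, r.2)

lemma pvGo (l : List Char) : ∀ (fuel : Nat) (cur : List Char) (acc : List (List Char)),
    l.length < fuel →
    PySem.Chars.splitOn.go ['1'] fuel l cur acc
      = acc.reverse ++ (cur.reverse ++ (pvSplit1 l).1) :: (pvSplit1 l).2 := by
  induction l with
  | nil =>
    intro fuel cur acc hf
    cases fuel with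
    | zero => omega
    | succ f => simp [PySem.Chars.splitOn.go, pvSplit1]
  | cons c cs ih =>
    intro fuel cur acc hf
    cases fuel with
    | zero => simp at hf
    | succ f =>
      by_cases hc : c = '1'
      · subst hc
        rw [show PySem.Chars.splitOn.go ['1'] (f+1) ('1'::cs) cur acc
            = PySem.Chars.splitOn.go ['1'] f cs [] (cur.reverse :: acc) from by
          simp [PySem.Chars.splitOn.go, List.isPrefixOf]]
        rw [ih f [] (cur.reverse :: acc) (by simpa using hf)]
        simp [pvSplit1]
      · rw [show PySem.Chars.splitOn.go ['1'] (f+1) (c::cs) cur acc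
            = PySem.Chars.splitOn.go ['1'] f cs (c :: cur) acc from by
          simp [PySem.Chars.splitOn.go, List.isPrefixOf,
            show ¬ '1' = c from fun h => hc h.symm]]
        rw [ih f (c :: cur) acc (by simpa using hf)]
        simp [pvSplit1, hc]

lemma pvSplitOn_eq (l : List Char) :
    PySem.Chars.splitOn l ['1'] = (pvSplit1 l).1 :: (pvSplit1 l).2 := by
  have h := pvGo l (l.length + 1) [] [] (by omega)
  simpa [PySem.Chars.splitOn] using h

-- the split of the LSB-first digits of n: first-piece length = lowest set bit,
-- later pieces are the zero-runs between set bits (gap - 1 each)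
lemma pvSplitBin (n : Nat) (hn : n ≠ 0) :
    ∃ h t p0 rest,
      pvPos n = h :: t ∧ pvSplit1 (pvBinRev n) = (p0, rest) ∧ p0.length = h ∧
      rest.map (fun run => (run.length : Int) + 1)
        = pvAdj (h : Int) (t.map (fun z : Nat => (z : Int)))
          ++ [((PySem.Int.bitLength (n : Int) : Nat) : Int)
              - pvLastD (h : Int) (t.map (fun z : Nat => (z : Int)))] := by
  induction n using Nat.strong_induction_on with
  | _ n ih =>
    have hbl : PySem.Int.bitLength (n : Int) = PySem.Int.bitLength ((n/2 : Nat) : Int) + 1 :=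
      PySem.Int.bitLength_natCast (Nat.pos_of_ne_zero hn)
    by_cases hodd : n % 2 = 1
    · obtain ⟨q, rfl⟩ : ∃ q, n = 2*q+1 := ⟨n/2, by omega⟩
      have hq2 : (2*q+1)/2 = q := by omega
      rw [hq2] at hbl
      have hbin : pvBinRev (2*q+1) = '1' :: pvBinRev q := by
        rw [pvBinRev, dif_neg hn, if_pos hodd, hq2]
      have hppos : pvPos (2*q+1) = 0 :: (pvPos q).map (· + 1) := by
        rw [pvPos, dif_neg hn, if_pos hodd, hq2]
      by_cases hq : q = 0
      · subst hq
        refine ⟨0, [], [], [[]], ?_, ?_, rfl, ?_⟩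
        · rw [hppos]; simp [pvPos]
        · rw [hbin]; simp [pvBinRev, pvSplit1]
        · simp only [List.map_cons, List.map_nil, pvAdj, pvLastD]
          norm_num
          decide
      · obtain ⟨hq', tq, p0q, restq, hposq, hspq, hp0q, hmapq⟩ := ih q (by omega) hq
        refine ⟨0, (pvPos q).map (· + 1), [], p0q :: restq, hppos, ?_, rfl, ?_⟩
        · rw [hbin]; simp [pvSplit1, hspq]
        · rw [hposq]
          simp only [List.map_cons, List.map_map, pvAdj, pvLastD]
          rw [hmapq]
          have e1 : ((p0q.length : Int) + 1) = ((hq' : Int) + 1) - 0 := by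
            rw [hp0q]; ring
          rw [e1]
          congr 1
          have e2 : ((tq.map (· + 1)).map (fun z : Nat => (z : Int)))
              = (tq.map (fun z : Nat => (z : Int))).map (fun z => z + 1) := pvCastMap tq
          have e3 : ((hq' + 1 : Nat) : Int) = ((hq' : Int)) + 1 := by push_cast; ring
          calc pvAdj ((hq' : Int)) (tq.map (fun z : Nat => (z : Int)))
                ++ [((PySem.Int.bitLength (q : Int) : Nat) : Int)
                    - pvLastD ((hq' : Int)) (tq.map (fun z : Nat => (z : Int)))]
              = pvAdj ((hq' : Int) + 1)
                  ((tq.map (fun z : Nat => (z : Int))).map (fun z => z + 1))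
                ++ [((PySem.Int.bitLength ((2*q+1 : Nat) : Int) : Nat) : Int)
                    - pvLastD ((hq' : Int) + 1)
                        ((tq.map (fun z : Nat => (z : Int))).map (fun z => z + 1))] := by
                rw [pvAdj_shift, pvLastD_shift, hbl]
                push_cast
                congr 2
                ring
            _ = _ := by
                rw [← e2]
                simp [List.map_map, e3]
    · obtain ⟨q, rfl⟩ : ∃ q, n = 2*q := ⟨n/2, by omega⟩
      have hq : q ≠ 0 := by omega
      have hq2 : (2*q)/2 = q := by omega
      rw [hq2] at hbl
      have hbin : pvBinRev (2*q) = '0' :: pvBinRev q := by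
        rw [pvBinRev, dif_neg hn, if_neg hodd, hq2]
      obtain ⟨hq', tq, p0q, restq, hposq, hspq, hp0q, hmapq⟩ := ih q (by omega) hq
      refine ⟨hq' + 1, tq.map (· + 1), '0' :: p0q, restq, ?_, ?_, ?_, ?_⟩
      · rw [pvPos, dif_neg hn, if_neg hodd, hq2, hposq]
        simp
      · rw [hbin]
        simp [pvSplit1, hspq]
      · simp [hp0q]
      · rw [hmapq]
        have e2 := pvCastMap tq
        have e3 : ((hq' + 1 : Nat) : Int) = ((hq' : Int)) + 1 := by push_cast; ring
        rw [e2, e3, pvAdj_shift, pvLastD_shift, hbl]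
        push_cast
        congr 2
        ring

-- last-element access and in-place update on S ++ [a]
lemma pvGetLast (S : List Int) (a : Int) :
    PySem.List.pyGetD (S ++ [a]) (-1) 0 = a := by
  rw [PySem.List.pyGetD_neg_ofNat (S ++ [a]) 1 0 (by omega) (by simp)]
  simp

lemma pvSetLast (S : List Int) (a v : Int) :
    PySem.List.pySetD (S ++ [a]) (-1) v = S ++ [v] := by
  simp [PySem.List.pySetD, PySem.List.pySet?, PySem.List.pyIdx?]

-- ===== VERDICT (by name: the statement is the Claim_ definition above) =====
theorem sizes_from_missing_edges_py_spec : Claim_equal_sizes_from_missing_edges_py := by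
  intro m pm _ hpre
  unfold Spec_sizes_from_missing_edges_py
  have hm : 0 < m := hpre.1
  obtain ⟨zN, hzm, hzb⟩ := pvPreElim m pm hpre
  simp only [sizes_from_missing_edges_py, sizes_from_missing_edges_py_alt]
  set L := (PySem.List.pyRange 0 m 1).filter
      (fun t => PySem.Int.band (pm >>> t.toNat) 1 == 0) with hLdef
  obtain ⟨M, hMeq, hbit⟩ := pvMaskedSpec m pm (le_of_lt hm)
  have hLM : (pvPos M).map (fun t : Nat => (t : Int)) = L := pvPosEq m pm (le_of_lt hm) M hbit
  have hLne : L ≠ [] := by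
    intro hnil
    have ht : ((zN : Nat) : Int) ∈ PySem.List.pyRange 0 m 1 := by
      rw [PySem.List.mem_pyRange_one]
      exact ⟨by positivity, hzm⟩
    have ht' : ((zN : Nat) : Int) ∈ L := List.mem_filter.mpr ⟨ht, by
      simp only [beq_iff_eq, Int.toNat_natCast, Int.shiftRight_natCast_right]
      exact hzb⟩
    simp [hnil] at ht'
  have hMne : M ≠ 0 := by
    intro h0
    subst h0
    rw [← hLM] at hLne
    simp [pvPos] at hLne
  obtain ⟨h, tl, p0, rest, hpos, hsp, hp0, hmap⟩ := pvSplitBin M hMne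
  have hLcons : L = ((h : Nat) : Int) :: tl.map (fun t : Nat => (t : Int)) := by
    rw [← hLM, hpos]; simp
  -- the A side
  have hpw : L.Pairwise (· < ·) :=
    (PySem.List.pairwise_lt_pyRange_one (a := 0) (b := m)).filter _
  have hsorted : PySem.List.sorted L (fun x => x) false = L :=
    PySem.List.sorted_eq_self_of_pairwise L (fun x => x) (hpw.imp (fun h => le_of_lt h))
  have hne : L.isEmpty = false := by simp [hLcons]
  rw [hne]
  simp only [Bool.false_eq_true, if_false, hsorted]
  rw [PySem.List.foldl_append_singleton_eq_map, hLcons, pvMapDiff]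
  set x : Int := ((h : Nat) : Int)
  set r : List Int := tl.map (fun t : Nat => (t : Int))
  have hget0 : PySem.List.pyGetD (x :: r) 0 0 = x := by
    simp [PySem.List.pyGetD_ofNat']
  have hgetlast : PySem.List.pyGetD (x :: r) (-1) 0 = pvLastD x r := by
    rw [PySem.List.pyGetD_neg_ofNat (x :: r) 1 0 (by omega) (by simp), pvLastD_getElem]
    congr 1
  rw [hget0, hgetlast]
  have hsum : (([] ++ pvAdj x r ++ [x + m - pvLastD x r]).sum = m) := by
    simp [pvAdj_sum]
  simp only [hsum, ne_eq, not_true_eq_false, if_false]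
  -- the B side
  rw [hMeq]
  have hMne2 : ((M : Int) == 0) = false := by
    simp [hMne]
  rw [hMne2]
  simp only [Bool.false_eq_true, if_false]
  have htn : (((M : Nat) : Int)).toNat = M := Int.toNat_natCast M
  rw [htn, pvSplitOn_eq (pvBinRev M), hsp]
  rw [PySem.List.slice_from _ (by omega : (0:Int) ≤ 1)]
  simp only [Int.toNat_one, List.drop_one, List.tail_cons]
  rw [hmap]
  have hrg : PySem.List.pyGetD ((p0 : List Char) :: rest) 0 [] = p0 := by
    simp [PySem.List.pyGetD_ofNat']
  rw [hrg, pvGetLast, pvSetLast]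
  congr 1
  rw [hp0]
  have hx : x = ((h : Nat) : Int) := rfl
  rw [hx]
  ring_nf
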